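-- pv_equiv track=rewrite | github.com/K9rishbhanushali/ResumeSpark | app.py | split_resume_points
-- ===== SOURCE A (Python) =====
-- def split_resume_points(text):
--     if not text:
--         return []
--     items = [text]
--     for separator in ["\n", ";", "|"]:
--         expanded = []
--         for item in items:
--             expanded.extend(item.split(separator))
--         items = expanded
--     cleaned = [item.strip(" -\t") for item in items if item.strip(" -\t")]
--     return cleaned or [text.strip()]
-- ===== SOURCE B (Python) =====
-- def split_resume_points(text):
--     if not text:
--         return []
--     # one pass: cut on all three delimiters simultaneously
--     parts = []
--     cur = []
--     for ch in text:
--         if ch in "\n;|":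
--             parts.append("".join(cur))
--             cur = []
--         else:
--             cur.append(ch)
--     parts.append("".join(cur))
--     cleaned = [p.strip(" -\t") for p in parts if p.strip(" -\t")]
--     return cleaned or [text.strip()]
-- ===== Notes on version B (the rewrite author's own statement) =====
-- stated objective: alternative
-- what changed: replaces the three sequential re-split passes over a growing list of pieces with a single character-scan that cuts on all three delimiters at once
import Mathlib
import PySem

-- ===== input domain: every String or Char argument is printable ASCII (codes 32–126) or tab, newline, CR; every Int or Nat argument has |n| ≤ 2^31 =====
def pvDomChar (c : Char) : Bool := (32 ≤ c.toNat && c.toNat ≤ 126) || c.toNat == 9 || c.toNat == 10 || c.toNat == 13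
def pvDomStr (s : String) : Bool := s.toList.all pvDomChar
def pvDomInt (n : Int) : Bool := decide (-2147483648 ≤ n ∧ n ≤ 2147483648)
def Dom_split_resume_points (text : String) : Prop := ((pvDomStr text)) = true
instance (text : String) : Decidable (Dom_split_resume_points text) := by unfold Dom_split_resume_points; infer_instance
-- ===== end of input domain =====

-- B replaces A's three sequential re-split passes over a growing list of pieces
-- with a single character-scan that cuts on all three delimiters at once (alternative, same cost).

-- ===== PORT A =====

-- item.split(sep) for a nonempty literal sep (Python str.split with explicit separator)
def pySplitSep (s sep : String) : List String :=
  (PySem.Chars.splitOn s.toList sep.toList).map String.ofList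

def split_resume_points (text : String) : List String :=
  if text = "" then []
  else
    let items := [text]
    let items := ["\n", ";", "|"].foldl
      (fun items sep => items.foldl (fun expanded item => expanded ++ pySplitSep item sep) []) items
    let cleaned := items.filterMap (fun item =>
      if PySem.Str.stripChars item " -\t" = "" then none
      else some (PySem.Str.stripChars item " -\t"))
    if cleaned = [] then [PySem.Str.strip text] else cleaned

-- ===== PORT B =====

def split_resume_points_alt (text : String) : List String :=
  if text = "" then []
  else
    let st := text.toList.foldl
      (fun (st : List String × List Char) ch =>
        if ch = '\n' ∨ ch = ';' ∨ ch = '|' then (st.1 ++ [String.ofList st.2], [])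
        else (st.1, st.2 ++ [ch])) ([], [])
    let parts := st.1 ++ [String.ofList st.2]
    let cleaned := parts.filterMap (fun p =>
      if PySem.Str.stripChars p " -\t" = "" then none
      else some (PySem.Str.stripChars p " -\t"))
    if cleaned = [] then [PySem.Str.strip text] else cleaned

-- ===== PRECONDITION & SPEC =====
def Spec_split_resume_points (text : String) (out : List String) : Prop := out = split_resume_points_alt text
instance (text : String) (out : List String) : Decidable (Spec_split_resume_points text out) := by unfold Spec_split_resume_points; infer_instance

-- ===== CLAIM (what is proved, stated in full; the proofs are below) =====
def Claim_equal_split_resume_points : Prop := ∀ (text : String), Dom_split_resume_points text → Spec_split_resume_points text (split_resume_points text)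

-- ===== LEMMAS AND PROOFS =====

-- structural split on a character predicate (proof-side reference form)
def spP (p : Char → Bool) : List Char → List (List Char)
  | [] => [[]]
  | c :: rest => if p c then [] :: spP p rest else (spP p rest).modifyHead (c :: ·)

theorem spP_ne_nil (p : Char → Bool) (l : List Char) : spP p l ≠ [] := by
  induction l with
  | nil => simp [spP]
  | cons c rest ih =>
    simp only [spP]
    split
    · simp
    · cases h : spP p rest with
      | nil => exact absurd h ih
      | cons a t => simp [List.modifyHead]

theorem spP_cons_ex (p : Char → Bool) (l : List Char) : ∃ a t, spP p l = a :: t := by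
  cases h : spP p l with
  | nil => exact absurd h (spP_ne_nil p l)
  | cons a t => exact ⟨a, t, rfl⟩

-- Chars.splitOn with a single-character separator is spP (· == c)
theorem splitOn_go_single (c : Char) (l : List Char) (fuel : Nat) (cur : List Char)
    (acc : List (List Char)) (hf : l.length ≤ fuel) :
    PySem.Chars.splitOn.go [c] fuel l cur acc =
      acc.reverse ++ (spP (· == c) l).modifyHead (cur.reverse ++ ·) := by
  induction l generalizing fuel cur acc with
  | nil =>
    cases fuel <;> simp [PySem.Chars.splitOn.go, spP, List.modifyHead]
  | cons x rest ih =>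
    cases fuel with
    | zero => simp at hf
    | succ fuel =>
      have hf' : rest.length ≤ fuel := by simp at hf; omega
      simp only [PySem.Chars.splitOn.go]
      by_cases hx : x = c
      · subst hx
        rw [if_pos (by simp [List.isPrefixOf])]
        have hdrop : List.drop [x].length (x :: rest) = rest := rfl
        rw [hdrop, ih fuel [] (cur.reverse :: acc) hf']
        obtain ⟨a, t, h⟩ := spP_cons_ex (· == x) rest
        simp [spP, h, List.modifyHead]
      · rw [if_neg (by simp [List.isPrefixOf]; exact fun hcx => hx hcx.symm)]
        rw [ih fuel (x :: cur) acc hf']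
        obtain ⟨a, t, h⟩ := spP_cons_ex (· == c) rest
        simp [spP, hx, h, List.modifyHead]

theorem splitOn_single (c : Char) (l : List Char) :
    PySem.Chars.splitOn l [c] = spP (· == c) l := by
  unfold PySem.Chars.splitOn
  rw [splitOn_go_single c l (l.length + 1) [] [] (by omega)]
  obtain ⟨a, t, h⟩ := spP_cons_ex (· == c) l
  simp [h, List.modifyHead]

-- re-splitting each piece of a p-split by q fuses into a single (p || q)-split
theorem spP_flatMap (p q : Char → Bool) (l : List Char) :
    (spP p l).flatMap (spP q) = spP (fun x => p x || q x) l := by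
  induction l with
  | nil => simp [spP]
  | cons x rest ih =>
    by_cases hp : p x
    · have hL : spP p (x :: rest) = [] :: spP p rest := by simp [spP, hp]
      have hR : spP (fun y => p y || q y) (x :: rest) = [] :: spP (fun y => p y || q y) rest := by
        simp [spP, hp]
      rw [hL, hR, List.flatMap_cons, ← ih]
      simp [spP]
    · obtain ⟨a, t, h⟩ := spP_cons_ex p rest
      have hL : spP p (x :: rest) = (x :: a) :: t := by simp [spP, hp, h, List.modifyHead]
      by_cases hq : q x
      · have hR : spP (fun y => p y || q y) (x :: rest) = [] :: spP (fun y => p y || q y) rest := by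
          simp [spP, hp, hq]
        rw [hL, hR, List.flatMap_cons, ← ih, h, List.flatMap_cons]
        have hq1 : spP q (x :: a) = [] :: spP q a := by simp [spP, hq]
        rw [hq1]
        simp
      · obtain ⟨b, u, hq2⟩ := spP_cons_ex q a
        have hR : spP (fun y => p y || q y) (x :: rest) =
            (spP (fun y => p y || q y) rest).modifyHead (x :: ·) := by simp [spP, hp, hq]
        rw [hL, List.flatMap_cons, hR, ← ih, h, List.flatMap_cons]
        have hq1 : spP q (x :: a) = (x :: b) :: u := by simp [spP, hq, hq2, List.modifyHead]
        rw [hq1, hq2]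
        simp [List.modifyHead]

def classP (c : Char) : Bool := c = '\n' ∨ c = ';' ∨ c = '|'

-- B's one-pass loop computes the structural class split
theorem loop_eq_spP (l : List Char) (acc : List String) (cur : List Char) :
    (let st := l.foldl
        (fun (st : List String × List Char) ch =>
          if ch = '\n' ∨ ch = ';' ∨ ch = '|' then (st.1 ++ [String.ofList st.2], [])
          else (st.1, st.2 ++ [ch])) (acc, cur)
     st.1 ++ [String.ofList st.2]) =
      acc ++ ((spP classP l).modifyHead (cur ++ ·)).map String.ofList := by
  induction l generalizing acc cur with
  | nil => simp [spP, List.modifyHead]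
  | cons x rest ih =>
    obtain ⟨a, t, h⟩ := spP_cons_ex classP rest
    by_cases hx : x = '\n' ∨ x = ';' ∨ x = '|'
    · simp only [List.foldl_cons, if_pos hx]
      rw [ih]
      have hc : classP x = true := by simp [classP, hx]
      simp [spP, hc, h, List.modifyHead]
    · simp only [List.foldl_cons, if_neg hx]
      rw [ih]
      have hc : classP x = false := by simp [classP]; tauto
      simp [spP, hc, h, List.modifyHead]

-- A's three passes produce exactly the class split, as strings
theorem a_items_eq (text : String) :
    (["\n", ";", "|"].foldl
      (fun items sep => items.foldl (fun expanded item => expanded ++ pySplitSep item sep) []) [text]) =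
      (spP classP text.toList).map String.ofList := by
  have hfold : ∀ (items : List String) (sep : String),
      items.foldl (fun expanded item => expanded ++ pySplitSep item sep) [] =
        items.flatMap (fun item => pySplitSep item sep) := by
    intro items sep
    simpa using PySem.List.foldl_append_eq_flatMap (fun item => pySplitSep item sep) items []
  have hsplit : ∀ (s : String) (c : Char) (sep : String), sep.toList = [c] →
      pySplitSep s sep = (spP (· == c) s.toList).map String.ofList := by
    intro s c sep hsep
    simp [pySplitSep, hsep, splitOn_single]
  have step : ∀ (p : Char → Bool) (c : Char) (sep : String), sep.toList = [c] → ∀ (l : List Char),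
      List.flatMap (fun item => pySplitSep item sep) ((spP p l).map String.ofList) =
        (spP (fun x => p x || x == c) l).map String.ofList := by
    intro p c sep hsep l
    rw [List.flatMap_map]
    have hfn : (fun a => pySplitSep (String.ofList a) sep) =
        fun a => (spP (· == c) a).map String.ofList := by
      funext a
      rw [hsplit _ c sep hsep, String.toList_ofList]
    rw [hfn, ← List.map_flatMap, spP_flatMap]
  have hn : ("\n" : String).toList = ['\n'] := by decide
  have hs : (";" : String).toList = [';'] := by decide
  have hb : ("|" : String).toList = ['|'] := by decide
  simp only [List.foldl_cons, List.foldl_nil, hfold, List.flatMap_cons, List.flatMap_nil,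
    List.append_nil]
  rw [hsplit text '\n' "\n" hn, step _ ';' ";" hs, step _ '|' "|" hb]
  have hfn : (fun x => (x == '\n' || x == ';') || x == '|') = classP := by
    funext x
    by_cases h1 : x = '\n' <;> by_cases h2 : x = ';' <;> by_cases h3 : x = '|' <;>
      simp [classP, h1, h2, h3]
  rw [hfn]

-- ===== VERDICT (by name: the statement is the Claim_ definition above) =====
theorem split_resume_points_spec : Claim_equal_split_resume_points := by
  intro text _
  unfold Spec_split_resume_points split_resume_points split_resume_points_alt
  by_cases h : text = ""
  · simp [h]
  · rw [if_neg h, if_neg h]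
    have hb := loop_eq_spP text.toList [] []
    simp only [List.nil_append] at hb
    have hmod : ∀ (ls : List (List Char)), ls.modifyHead (fun x => x) = ls := by
      intro ls
      cases ls <;> simp [List.modifyHead]
    rw [hmod] at hb
    simp only [a_items_eq, hb]
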